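-- pv_equiv track=rewrite | github.com/nbratek/AlgorytmyGrafowe | lab1/lab1.py | dfs
-- ===== SOURCE A (Python) =====
-- def dfs(adjlist, s, t, minw):
--     def dfs_visit(u):
--         visited[u] = True
--         for (v, c) in adjlist[u]:
--             if not visited[v] and c >= minw:
--                 dfs_visit(v)
--     visited = [ False for i in range(len(adjlist))]
--     dfs_visit(s)
--     return visited[t]
-- ===== SOURCE B (Python) =====
-- def dfs(adjlist, s, t, minw):
--     n = len(adjlist)
--     visited = [False] * n
--     visited[s] = True
--     for _ in range(n):
--         for u in range(n):
--             if visited[u]: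
--                 for v, c in adjlist[u]:
--                     if c >= minw:
--                         visited[v] = True
--     return visited[t]
-- ===== Notes on version B (the rewrite author's own statement) =====
-- stated objective: alternative
-- what changed: Replaces A's recursive depth-first search by a Bellman-Ford-style fixed-point closure: n rounds that sweep all nodes and relax every admissible edge out of an already-marked node, with no recursion and no stack; after n rounds the marked set is exactly the reachable set.
-- outside the precondition, e.g. on dfs([[], [(5, 1)]], 0, 0, 0): A returns True, B returns True; on dfs([[(3, 0)]], 0, 0, 5): A raises IndexError, B returns True
import Mathlib
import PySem

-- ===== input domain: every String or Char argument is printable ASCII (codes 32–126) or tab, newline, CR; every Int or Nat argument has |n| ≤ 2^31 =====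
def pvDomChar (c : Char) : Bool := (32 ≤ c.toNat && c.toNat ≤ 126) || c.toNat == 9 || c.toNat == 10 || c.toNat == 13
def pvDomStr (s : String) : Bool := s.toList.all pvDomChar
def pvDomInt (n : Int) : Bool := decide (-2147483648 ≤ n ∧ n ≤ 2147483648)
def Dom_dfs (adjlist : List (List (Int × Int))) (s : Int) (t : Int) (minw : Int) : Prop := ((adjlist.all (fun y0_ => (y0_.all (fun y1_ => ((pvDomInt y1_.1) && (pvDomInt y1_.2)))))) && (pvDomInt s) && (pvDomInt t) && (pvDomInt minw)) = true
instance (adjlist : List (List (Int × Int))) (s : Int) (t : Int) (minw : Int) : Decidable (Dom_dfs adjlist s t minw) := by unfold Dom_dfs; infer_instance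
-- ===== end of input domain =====

-- B replaces A's recursive depth-first search by a Bellman-Ford-style fixed-point closure
-- (n rounds sweeping all nodes, relaxing every admissible edge out of a marked node); the
-- marked set after n rounds is the same reachable set, hence the same return value.

-- ===== PORT A =====
-- fuel = number of recursion levels still allowed; A's recursion depth is bounded by the number of
-- unvisited nodes, so the fuel adjlist.length + 1 supplied by `dfs` is never exhausted.
def dfsVisitA (A : List (List (Int × Int))) (m : Int) : Nat → Int → List Bool → List Bool
  | 0, _, w => w
  | f + 1, u, w =>
      (PySem.List.pyGetD A u []).foldl
        (fun acc p =>
          if PySem.List.pyGetD acc p.1 true = false ∧ m ≤ p.2 then dfsVisitA A m f p.1 acc else acc)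
        (PySem.List.pySetD w u true)

def dfs (adjlist : List (List (Int × Int))) (s : Int) (t : Int) (minw : Int) : Bool :=
  PySem.List.pyGetD
    (dfsVisitA adjlist minw (adjlist.length + 1) s (List.replicate adjlist.length false)) t false

-- ===== PORT B =====
-- one sweep of Source B's inner `for u in range(n)` loop over the mutating visited list
def roundB (A : List (List (Int × Int))) (m : Int) (w : List Bool) : List Bool :=
  (PySem.List.pyRange 0 (A.length : Int) 1).foldl
    (fun acc u =>
      if PySem.List.pyGetD acc u false = true then
        (PySem.List.pyGetD A u []).foldl
          (fun acc2 p => if m ≤ p.2 then PySem.List.pySetD acc2 p.1 true else acc2) acc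
      else acc) w

-- Source B's outer `for _ in range(n)` loop: k sequential sweeps
def iterB (A : List (List (Int × Int))) (m : Int) : Nat → List Bool → List Bool
  | 0, w => w
  | k + 1, w => iterB A m k (roundB A m w)

def dfs_alt (adjlist : List (List (Int × Int))) (s : Int) (t : Int) (minw : Int) : Bool :=
  PySem.List.pyGetD
    (iterB adjlist minw adjlist.length
      (PySem.List.pySetD (List.replicate adjlist.length false) s true)) t false

-- ===== PRECONDITION & SPEC =====
-- Pre_ excludes the empty adjlist and any out-of-range node index (s, t, or an edge target):
-- there A raises IndexError when the index is dereferenced.  It over-approximates the raising set: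
-- an out-of-range edge target inside a never-visited adjacency list is also excluded although A
-- returns there (A and B agree on such inputs anyway).
def Pre_dfs (adjlist : List (List (Int × Int))) (s : Int) (t : Int) (minw : Int) : Prop :=
  0 < adjlist.length ∧ PySem.Raise.InRange adjlist.length s ∧
    PySem.Raise.InRange adjlist.length t ∧
    ∀ l ∈ adjlist, ∀ p ∈ l, PySem.Raise.InRange adjlist.length p.1
instance (adjlist : List (List (Int × Int))) (s : Int) (t : Int) (minw : Int) : Decidable (Pre_dfs adjlist s t minw) := by unfold Pre_dfs; infer_instance

def pvWitness_dfs : (List (List (Int × Int))) × Int × Int × Int := ([[(1, 0)], []], 0, 1, 0)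

def Spec_dfs (adjlist : List (List (Int × Int))) (s : Int) (t : Int) (minw : Int) (out : Bool) : Prop := out = dfs_alt adjlist s t minw
instance (adjlist : List (List (Int × Int))) (s : Int) (t : Int) (minw : Int) (out : Bool) : Decidable (Spec_dfs adjlist s t minw out) := by unfold Spec_dfs; infer_instance

-- ===== CLAIM (what is proved, stated in full; the proofs are below) =====
def Claim_equal_dfs : Prop := ∀ (adjlist : List (List (Int × Int))) (s : Int) (t : Int) (minw : Int), Dom_dfs adjlist s t minw → Pre_dfs adjlist s t minw → Spec_dfs adjlist s t minw (dfs adjlist s t minw)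

-- ===== LEMMAS AND PROOFS =====

-- normalised index: the position Python's (possibly negative) index u denotes in a list of length n
def ixn (n : Nat) (u : Int) : Nat := if 0 ≤ u then u.toNat else n - (-u).toNat

-- one admissible edge of the graph, on normalised positions
def relG (A : List (List (Int × Int))) (m : Int) (a b : Nat) : Prop :=
  ∃ p ∈ A.getD a [], m ≤ p.2 ∧ ixn A.length p.1 = b

def ReachG (A : List (List (Int × Int))) (m : Int) : Nat → Nat → Prop :=
  Relation.ReflTransGen (relG A m)

def closedAt (A : List (List (Int × Int))) (m : Int) (w : List Bool) (j : Nat) : Prop :=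
  ∀ b, relG A m j b → w.getD b false = true

def EdgesOk (A : List (List (Int × Int))) : Prop :=
  ∀ l ∈ A, ∀ p ∈ l, PySem.Raise.InRange A.length p.1

-- bundle of facts about one visiting pass starting at position u0 turning w into r
def AOut (A : List (List (Int × Int))) (m : Int) (u0 : Nat) (w r : List Bool) : Prop :=
  r.length = w.length ∧
  (∀ j, w.getD j false = true → r.getD j false = true) ∧
  (∀ j, r.getD j false = true → w.getD j false = true ∨ ReachG A m u0 j) ∧
  (∀ j, r.getD j false = true → w.getD j false = false → closedAt A m r j) ∧
  r.count false ≤ w.count false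

def stepA (A : List (List (Int × Int))) (m : Int) (f : Nat) : List Bool → (Int × Int) → List Bool :=
  fun acc p =>
    if PySem.List.pyGetD acc p.1 true = false ∧ m ≤ p.2 then dfsVisitA A m f p.1 acc else acc

lemma dfsVisitA_succ (A : List (List (Int × Int))) (m : Int) (f : Nat) (u : Int) (w : List Bool) :
    dfsVisitA A m (f + 1) u w =
      (PySem.List.pyGetD A u []).foldl (stepA A m f) (PySem.List.pySetD w u true) := rfl

lemma ixn_lt (n : Nat) (u : Int) (hu : PySem.Raise.InRange n u) : ixn n u < n := by
  obtain ⟨h1, h2⟩ := hu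
  unfold ixn
  split <;> omega

lemma pyIdx_eq (n : Nat) (u : Int) (hu : PySem.Raise.InRange n u) :
    PySem.List.pyIdx? n u = some (ixn n u) := by
  obtain ⟨h1, h2⟩ := hu
  simp only [PySem.List.pyIdx?, ixn]
  split <;> simp_all <;> omega

lemma pyGetD_eq {α : Type} (xs : List α) (u : Int) (d d' : α)
    (hu : PySem.Raise.InRange xs.length u) :
    PySem.List.pyGetD xs u d = xs.getD (ixn xs.length u) d' := by
  have hk := ixn_lt xs.length u hu
  simp [PySem.List.pyGetD, PySem.List.pyGet?, pyIdx_eq _ _ hu,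
    List.getD_eq_getElem?_getD, List.getElem?_eq_getElem hk]

lemma pySetD_eq {α : Type} (xs : List α) (u : Int) (v : α)
    (hu : PySem.Raise.InRange xs.length u) :
    PySem.List.pySetD xs u v = xs.set (ixn xs.length u) v := by
  simp [PySem.List.pySetD, PySem.List.pySet?, pyIdx_eq _ _ hu]

lemma edge_inRange (A : List (List (Int × Int))) (hE : EdgesOk A) (u0 : Nat) (p : Int × Int)
    (hp : p ∈ A.getD u0 []) : PySem.Raise.InRange A.length p.1 := by
  by_cases h : u0 < A.length
  · exact hE (A.getD u0 []) (by rw [List.getD_eq_getElem _ _ h]; exact A.getElem_mem h) p hp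
  · rw [List.getD_eq_default _ _ (by omega)] at hp
    simp at hp

lemma getD_set_true_self (w : List Bool) (j : Nat) (hj : j < w.length) :
    (w.set j true).getD j false = true := by
  simp [List.getD_eq_getElem?_getD, List.getElem?_set_self (by simpa using hj)]

lemma getD_set_ne (w : List Bool) (j i : Nat) (b : Bool) (h : i ≠ j) :
    (w.set j b).getD i false = w.getD i false := by
  simp [List.getD_eq_getElem?_getD, List.getElem?_set_ne (Ne.symm h)]

lemma cF_set_true (w : List Bool) (j : Nat) (hj : j < w.length)
    (hw : w.getD j false = false) : (w.set j true).count false + 1 = w.count false := by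
  induction w generalizing j with
  | nil => simp at hj
  | cons a w ih =>
    cases j with
    | zero =>
      simp [List.getD] at hw
      simp [hw, List.count_cons]
    | succ j =>
      have := ih j (by simpa using hj) (by simpa [List.getD] using hw)
      simp only [List.set_cons_succ, List.count_cons]
      omega

lemma closedAt_mono (A : List (List (Int × Int))) (m : Int) (w r : List Bool) (j : Nat)
    (hm : ∀ i, w.getD i false = true → r.getD i false = true)
    (h : closedAt A m w j) : closedAt A m r j := fun b hb => hm b (h b hb)

lemma AOut_trans (A : List (List (Int × Int))) (m : Int) (u0 : Nat) (w w1 r : List Bool)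
    (h1 : AOut A m u0 w w1) (h2 : AOut A m u0 w1 r) : AOut A m u0 w r := by
  obtain ⟨l1, m1, s1, c1, n1⟩ := h1
  obtain ⟨l2, m2, s2, c2, n2⟩ := h2
  refine ⟨l2.trans l1, fun j hj => m2 j (m1 j hj), ?_, ?_, n2.trans n1⟩
  · intro j hj
    rcases s2 j hj with h | h
    · exact s1 j h
    · exact Or.inr h
  · intro j hj hw
    by_cases h : w1.getD j false = true
    · exact closedAt_mono A m w1 r j m2 (c1 j h hw)
    · exact c2 j hj (by simpa using h)

lemma AOut_lift (A : List (List (Int × Int))) (m : Int) (u0 v0 : Nat) (w r : List Bool)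
    (hrel : relG A m u0 v0) (h : AOut A m v0 w r) : AOut A m u0 w r := by
  obtain ⟨l, mo, s, c, n⟩ := h
  exact ⟨l, mo, fun j hj => (s j hj).imp id (fun h => Relation.ReflTransGen.head hrel h), c, n⟩

lemma AOut_refl (A : List (List (Int × Int))) (m : Int) (u0 : Nat) (w : List Bool) :
    AOut A m u0 w w := by
  refine ⟨rfl, fun j h => h, fun j h => Or.inl h, fun j hj hw => ?_, le_rfl⟩
  · rw [hj] at hw; exact absurd hw (by simp)

lemma A_fold (A : List (List (Int × Int))) (m : Int) (f : Nat) (hE : EdgesOk A)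
    (ih : ∀ (u : Int) (w : List Bool), w.length = A.length →
      PySem.Raise.InRange A.length u → w.count false < f →
      w.getD (ixn A.length u) false = false →
      AOut A m (ixn A.length u) w (dfsVisitA A m f u w) ∧
        (dfsVisitA A m f u w).getD (ixn A.length u) false = true ∧
        (dfsVisitA A m f u w).count false < w.count false)
    (u0 : Nat) :
    ∀ (L : List (Int × Int)) (w : List Bool), (∀ p ∈ L, p ∈ A.getD u0 []) →
      w.length = A.length → w.count false < f →
      AOut A m u0 w (L.foldl (stepA A m f) w) ∧
        (∀ p ∈ L, m ≤ p.2 → (L.foldl (stepA A m f) w).getD (ixn A.length p.1) false = true) := by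
  intro L
  induction L with
  | nil => intro w _ _ _; exact ⟨AOut_refl A m u0 w, by simp⟩
  | cons p L ihL =>
    intro w hL hw hf
    have hpA : p ∈ A.getD u0 [] := hL p (List.mem_cons_self)
    have hpR : PySem.Raise.InRange A.length p.1 := edge_inRange A hE u0 p hpA
    have hbridge : PySem.List.pyGetD w p.1 true = w.getD (ixn A.length p.1) false := by
      rw [pyGetD_eq w p.1 true false (by rwa [hw])]
      congr 1
      rw [hw]
    by_cases hg : PySem.List.pyGetD w p.1 true = false ∧ m ≤ p.2
    · -- recursive visit of p.1
      have hstep : stepA A m f w p = dfsVisitA A m f p.1 w := by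
        simp [stepA, hg]
      have hwp : w.getD (ixn A.length p.1) false = false := by rw [← hbridge]; exact hg.1
      obtain ⟨hA1, hMk, hCt⟩ := ih p.1 w hw hpR hf hwp
      have hrel : relG A m u0 (ixn A.length p.1) := ⟨p, hpA, hg.2, rfl⟩
      have hA1' : AOut A m u0 w (dfsVisitA A m f p.1 w) := AOut_lift A m _ _ _ _ hrel hA1
      have hlen1 : (dfsVisitA A m f p.1 w).length = A.length := hA1'.1.trans hw
      obtain ⟨hA2, hPr⟩ := ihL (dfsVisitA A m f p.1 w) (fun q hq => hL q (List.mem_cons_of_mem _ hq))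
        hlen1 (lt_of_le_of_lt (Nat.le_of_lt_succ (Nat.lt_succ_of_lt hCt)) hf)
      rw [List.foldl_cons, hstep]
      refine ⟨AOut_trans A m u0 _ _ _ hA1' hA2, ?_⟩
      intro q hq hmq
      rcases List.mem_cons.mp hq with rfl | hq'
      · exact hA2.2.1 _ hMk
      · exact hPr q hq' hmq
    · -- neighbour skipped
      have hstep : stepA A m f w p = w := by simp [stepA, hg]
      obtain ⟨hA2, hPr⟩ := ihL w (fun q hq => hL q (List.mem_cons_of_mem _ hq)) hw hf
      rw [List.foldl_cons, hstep]
      refine ⟨hA2, ?_⟩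
      intro q hq hmq
      rcases List.mem_cons.mp hq with rfl | hq'
      · -- guard failed although m ≤ q.2, so q.1 was already visited
        have : PySem.List.pyGetD w q.1 true = true := by
          rcases Bool.eq_false_or_eq_true (PySem.List.pyGetD w q.1 true) with h | h
          · exact h
          · exact absurd ⟨h, hmq⟩ hg
        exact hA2.2.1 _ (by rw [← hbridge]; exact this)
      · exact hPr q hq' hmq

lemma A_main (A : List (List (Int × Int))) (m : Int) (hE : EdgesOk A) :
    ∀ (f : Nat) (u : Int) (w : List Bool), w.length = A.length →
      PySem.Raise.InRange A.length u → w.count false < f →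
      w.getD (ixn A.length u) false = false →
      AOut A m (ixn A.length u) w (dfsVisitA A m f u w) ∧
        (dfsVisitA A m f u w).getD (ixn A.length u) false = true ∧
        (dfsVisitA A m f u w).count false < w.count false := by
  intro f
  induction f with
  | zero => intro u w _ _ hf _; omega
  | succ f ihf =>
    intro u w hw hu hf hwu
    have hku : ixn A.length u < A.length := ixn_lt A.length u hu
    have hset : PySem.List.pySetD w u true = w.set (ixn A.length u) true := by
      rw [pySetD_eq w u true (by rwa [hw])]
      congr 1
      rw [hw]
    have hLA : PySem.List.pyGetD A u [] = A.getD (ixn A.length u) [] :=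
      pyGetD_eq A u [] [] hu
    set w1 := w.set (ixn A.length u) true with hw1
    have hl1 : w1.length = A.length := by simp [hw1, hw]
    have hcf : w1.count false + 1 = w.count false :=
      cF_set_true w _ (by omega) hwu
    have hf1 : w1.count false < f := by omega
    obtain ⟨hAF, hPr⟩ := A_fold A m f hE ihf (ixn A.length u)
      (A.getD (ixn A.length u) []) w1 (fun p hp => hp) hl1 hf1
    rw [dfsVisitA_succ, hset, hLA]
    set r := (A.getD (ixn A.length u) []).foldl (stepA A m f) w1 with hr
    obtain ⟨hrl, hrm, hrs, hrc, hrn⟩ := hAF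
    have hmono1 : ∀ j, w.getD j false = true → w1.getD j false = true := by
      intro j hj
      by_cases h : j = ixn A.length u
      · subst h; exact getD_set_true_self w _ (by omega)
      · rwa [getD_set_ne _ _ _ _ h]
    have hmarked : r.getD (ixn A.length u) false = true :=
      hrm _ (getD_set_true_self w _ (by omega))
    refine ⟨⟨by simp [hrl, hw1], fun j hj => hrm j (hmono1 j hj), ?_, ?_, by omega⟩, hmarked, by omega⟩
    · -- soundness
      intro j hj
      rcases hrs j hj with h | h
      · by_cases hju : j = ixn A.length u
        · exact Or.inr (hju ▸ Relation.ReflTransGen.refl)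
        · exact Or.inl (by rwa [getD_set_ne _ _ _ _ hju] at h)
      · exact Or.inr h
    · -- closure of newly visited nodes
      intro j hj hwj
      by_cases hju : j = ixn A.length u
      · subst hju
        intro b hb
        obtain ⟨p, hp, hmp, hip⟩ := hb
        exact hip ▸ hPr p hp hmp
      · exact hrc j hj (by rwa [getD_set_ne _ _ _ _ hju])

lemma A_char (A : List (List (Int × Int))) (m : Int) (s : Int) (hE : EdgesOk A)
    (hn : 0 < A.length) (hs : PySem.Raise.InRange A.length s) :
    ∀ j, (dfsVisitA A m (A.length + 1) s (List.replicate A.length false)).getD j false = true ↔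
      ReachG A m (ixn A.length s) j := by
  have hrep : ∀ j, (List.replicate A.length false).getD j false = false := by
    intro j
    by_cases h : j < A.length
    · simp [List.getD_eq_getElem?_getD, List.getElem?_replicate, h]
    · rw [List.getD_eq_default _ _ (by simpa using not_lt.mp h)]
  obtain ⟨⟨hl, hm, hsound, hclosed, _⟩, hmk, _⟩ :=
    A_main A m hE (A.length + 1) s (List.replicate A.length false)
      (by simp) hs (by simp [List.count_replicate]) (hrep _)
  intro j
  constructor
  · intro hj
    rcases hsound j hj with h | h
    · rw [hrep j] at h; exact absurd h (by simp)
    · exact h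
  · intro h
    induction h with
    | refl => exact hmk
    | tail h1 h2 ihr => exact hclosed _ ihr (hrep _) _ h2

-- ===== B-side lemmas =====

-- the two fold bodies of roundB, named for the proofs
def innerB (m : Int) : List Bool → (Int × Int) → List Bool :=
  fun acc2 p => if m ≤ p.2 then PySem.List.pySetD acc2 p.1 true else acc2

def outerB (A : List (List (Int × Int))) (m : Int) : List Bool → Int → List Bool :=
  fun acc u =>
    if PySem.List.pyGetD acc u false = true then
      (PySem.List.pyGetD A u []).foldl
        (fun acc2 p => if m ≤ p.2 then PySem.List.pySetD acc2 p.1 true else acc2) acc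
    else acc

lemma roundB_eq (A : List (List (Int × Int))) (m : Int) (w : List Bool) :
    roundB A m w = (PySem.List.pyRange 0 (A.length : Int) 1).foldl (outerB A m) w := rfl

lemma inner_fold (A : List (List (Int × Int))) (m : Int) (hE : EdgesOk A) (u0 : Nat) :
    ∀ (L : List (Int × Int)) (acc : List Bool), (∀ p ∈ L, p ∈ A.getD u0 []) →
      acc.length = A.length →
      (L.foldl (innerB m) acc).length = A.length ∧
      (∀ j, acc.getD j false = true → (L.foldl (innerB m) acc).getD j false = true) ∧
      (∀ j, (L.foldl (innerB m) acc).getD j false = true →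
        acc.getD j false = true ∨ relG A m u0 j) ∧
      (∀ p ∈ L, m ≤ p.2 → (L.foldl (innerB m) acc).getD (ixn A.length p.1) false = true) := by
  intro L
  induction L with
  | nil =>
    intro acc _ hl
    exact ⟨hl, fun j h => h, fun j h => Or.inl h, by simp⟩
  | cons p L ihL =>
    intro acc hL hl
    have hpA : p ∈ A.getD u0 [] := hL p (List.mem_cons_self)
    have hpR : PySem.Raise.InRange A.length p.1 := edge_inRange A hE u0 p hpA
    have hkp : ixn A.length p.1 < A.length := ixn_lt _ _ hpR
    by_cases hm : m ≤ p.2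
    · have hstep : innerB m acc p = acc.set (ixn A.length p.1) true := by
        simp only [innerB, hm, if_true]
        rw [pySetD_eq acc p.1 true (by rwa [hl])]
        congr 1
        rw [hl]
      set acc1 := acc.set (ixn A.length p.1) true with hacc1
      have hl1 : acc1.length = A.length := by simp [hacc1, hl]
      have hmono1 : ∀ j, acc.getD j false = true → acc1.getD j false = true := by
        intro j hj
        by_cases h : j = ixn A.length p.1
        · subst h; exact getD_set_true_self acc _ (by omega)
        · rwa [getD_set_ne _ _ _ _ h]
      obtain ⟨hbl, hbm, hbs, hbp⟩ := ihL acc1 (fun q hq => hL q (List.mem_cons_of_mem _ hq)) hl1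
      rw [List.foldl_cons, hstep]
      refine ⟨hbl, fun j hj => hbm j (hmono1 j hj), ?_, ?_⟩
      · intro j hj
        rcases hbs j hj with h | h
        · by_cases hjp : j = ixn A.length p.1
          · exact Or.inr (hjp ▸ ⟨p, hpA, hm, rfl⟩)
          · exact Or.inl (by rwa [getD_set_ne _ _ _ _ hjp] at h)
        · exact Or.inr h
      · intro q hq hmq
        rcases List.mem_cons.mp hq with rfl | hq'
        · exact hbm _ (getD_set_true_self acc _ (by omega))
        · exact hbp q hq' hmq
    · have hstep : innerB m acc p = acc := by simp [innerB, hm]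
      obtain ⟨hbl, hbm, hbs, hbp⟩ := ihL acc (fun q hq => hL q (List.mem_cons_of_mem _ hq)) hl
      rw [List.foldl_cons, hstep]
      refine ⟨hbl, hbm, hbs, ?_⟩
      intro q hq hmq
      rcases List.mem_cons.mp hq with rfl | hq'
      · exact absurd hmq hm
      · exact hbp q hq' hmq

lemma outer_fold (A : List (List (Int × Int))) (m : Int) (hE : EdgesOk A) (r0 : Nat) :
    ∀ (L : List Int) (acc : List Bool), (∀ u ∈ L, 0 ≤ u ∧ u < (A.length : Int)) →
      acc.length = A.length →
      (L.foldl (outerB A m) acc).length = A.length ∧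
      (∀ j, acc.getD j false = true → (L.foldl (outerB A m) acc).getD j false = true) ∧
      ((∀ j, acc.getD j false = true → ReachG A m r0 j) →
        ∀ j, (L.foldl (outerB A m) acc).getD j false = true → ReachG A m r0 j) ∧
      (∀ u ∈ L, acc.getD (ixn A.length u) false = true →
        ∀ p ∈ A.getD (ixn A.length u) [], m ≤ p.2 →
          (L.foldl (outerB A m) acc).getD (ixn A.length p.1) false = true) := by
  intro L
  induction L with
  | nil =>
    intro acc _ hl
    exact ⟨hl, fun j h => h, fun hInv j hj => hInv j hj, by simp⟩
  | cons u L ihL =>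
    intro acc hL hl
    obtain ⟨hu0, hun⟩ := hL u (List.mem_cons_self)
    have huR : PySem.Raise.InRange A.length u := ⟨by omega, by omega⟩
    have hbridge : PySem.List.pyGetD acc u false = acc.getD (ixn A.length u) false := by
      rw [pyGetD_eq acc u false false (by rwa [hl])]
      congr 1
      rw [hl]
    have hLA : PySem.List.pyGetD A u [] = A.getD (ixn A.length u) [] :=
      pyGetD_eq A u [] [] huR
    by_cases hg : PySem.List.pyGetD acc u false = true
    · -- guard true: relax all admissible edges out of u
      have hstep : outerB A m acc u =
          (A.getD (ixn A.length u) []).foldl (innerB m) acc := by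
        simp only [outerB, hg, if_true, hLA]
        rfl
      obtain ⟨hil, him, his, hip⟩ :=
        inner_fold A m hE (ixn A.length u) (A.getD (ixn A.length u) []) acc (fun p hp => hp) hl
      set acc1 := (A.getD (ixn A.length u) []).foldl (innerB m) acc with hacc1
      obtain ⟨hbl, hbm, hbs, hbp⟩ := ihL acc1 (fun v hv => hL v (List.mem_cons_of_mem _ hv)) hil
      rw [List.foldl_cons, hstep]
      refine ⟨hbl, fun j hj => hbm j (him j hj), ?_, ?_⟩
      · intro hInv j hj
        refine hbs ?_ j hj
        intro i hi
        rcases his i hi with h | h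
        · exact hInv i h
        · obtain ⟨p, hp, hmp, hip'⟩ := h
          have hru : ReachG A m r0 (ixn A.length u) := hInv _ (by rwa [← hbridge])
          exact Relation.ReflTransGen.tail hru ⟨p, hp, hmp, hip'⟩
      · intro v hv hvT p hp hmp
        rcases List.mem_cons.mp hv with rfl | hv'
        · exact hbm _ (hip p hp hmp)
        · exact hbp v hv' (him _ hvT) p hp hmp
    · -- guard false: nothing happens at u
      have hstep : outerB A m acc u = acc := by simp [outerB, hg]
      obtain ⟨hbl, hbm, hbs, hbp⟩ := ihL acc (fun v hv => hL v (List.mem_cons_of_mem _ hv)) hl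
      rw [List.foldl_cons, hstep]
      refine ⟨hbl, hbm, hbs, ?_⟩
      intro v hv hvT p hp hmp
      rcases List.mem_cons.mp hv with rfl | hv'
      · exact absurd (by rwa [hbridge]) hg
      · exact hbp v hv' hvT p hp hmp

lemma range_bounds (A : List (List (Int × Int))) :
    ∀ u ∈ PySem.List.pyRange 0 (A.length : Int) 1, 0 ≤ u ∧ u < (A.length : Int) := by
  intro u hu
  rw [PySem.List.mem_pyRange_one] at hu
  exact hu

lemma roundB_len (A : List (List (Int × Int))) (m : Int) (hE : EdgesOk A) (w : List Bool)
    (hw : w.length = A.length) : (roundB A m w).length = A.length := by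
  rw [roundB_eq]
  exact (outer_fold A m hE 0 _ w (range_bounds A) hw).1

lemma roundB_mono (A : List (List (Int × Int))) (m : Int) (hE : EdgesOk A) (w : List Bool)
    (hw : w.length = A.length) :
    ∀ j, w.getD j false = true → (roundB A m w).getD j false = true := by
  rw [roundB_eq]
  exact (outer_fold A m hE 0 _ w (range_bounds A) hw).2.1

lemma roundB_sound (A : List (List (Int × Int))) (m : Int) (hE : EdgesOk A) (r0 : Nat)
    (w : List Bool) (hw : w.length = A.length)
    (hInv : ∀ j, w.getD j false = true → ReachG A m r0 j) :
    ∀ j, (roundB A m w).getD j false = true → ReachG A m r0 j := by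
  rw [roundB_eq]
  exact (outer_fold A m hE r0 _ w (range_bounds A) hw).2.2.1 hInv

lemma roundB_marks (A : List (List (Int × Int))) (m : Int) (hE : EdgesOk A) (w : List Bool)
    (hw : w.length = A.length) (u : Nat) (hu : u < A.length)
    (hT : w.getD u false = true) :
    ∀ p ∈ A.getD u [], m ≤ p.2 → (roundB A m w).getD (ixn A.length p.1) false = true := by
  intro p hp hmp
  have hmem : (u : Int) ∈ PySem.List.pyRange 0 (A.length : Int) 1 := by
    rw [PySem.List.mem_pyRange_one]
    constructor <;> [positivity; exact_mod_cast hu]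
  have hix : ixn A.length (u : Int) = u := by simp [ixn]
  rw [roundB_eq]
  exact (outer_fold A m hE 0 _ w (range_bounds A) hw).2.2.2 (u : Int) hmem
    (by rwa [hix]) p (by rwa [hix]) hmp

-- pointwise-monotone lists of equal length: count of false does not increase, and strictly
-- decreases unless the lists are equal
lemma count_false_mono : ∀ (w r : List Bool), r.length = w.length →
    (∀ j, w.getD j false = true → r.getD j false = true) →
    r.count false ≤ w.count false ∧ (r ≠ w → r.count false < w.count false) := by
  intro w
  induction w with
  | nil =>
    intro r hl _
    rw [List.length_nil, List.length_eq_zero_iff] at hl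
    subst hl
    exact ⟨le_rfl, fun h => absurd rfl h⟩
  | cons a w ih =>
    intro r hl hm
    match r with
    | [] => simp at hl
    | b :: r =>
      have hlt : r.length = w.length := by simpa using hl
      have hmt : ∀ j, w.getD j false = true → r.getD j false = true := by
        intro j hj
        have := hm (j + 1) (by simpa [List.getD] using hj)
        simpa [List.getD] using this
      obtain ⟨hle, hlt'⟩ := ih r hlt hmt
      have hhead : a = true → b = true := by
        intro ha
        have := hm 0 (by simpa [List.getD] using ha)
        simpa [List.getD] using this
      constructor
      · cases a with
        | false =>
          cases b with
          | false => simp [List.count_cons]; omega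
          | true => simp [List.count_cons]; omega
        | true =>
          have hb := hhead rfl
          subst hb
          simp [List.count_cons]
          omega
      · intro hne
        by_cases hh : a = b
        · subst hh
          have hrw : r.count false < w.count false := hlt' (fun h => hne (by rw [h]))
          cases a <;> simp [List.count_cons] <;> omega
        · have ha : a = false := by
            cases a
            · rfl
            · exact absurd (hhead rfl).symm hh
          have hb : b = true := by cases b <;> simp_all
          subst ha hb
          simp [List.count_cons]
          omega

lemma iterB_fix (A : List (List (Int × Int))) (m : Int) (w : List Bool)
    (hfix : roundB A m w = w) : ∀ k, iterB A m k w = w := by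
  intro k
  induction k with
  | zero => rfl
  | succ k ih => rw [iterB, hfix, ih]

lemma iterB_len (A : List (List (Int × Int))) (m : Int) (hE : EdgesOk A) :
    ∀ (k : Nat) (w : List Bool), w.length = A.length → (iterB A m k w).length = A.length := by
  intro k
  induction k with
  | zero => intro w hw; exact hw
  | succ k ih => intro w hw; exact ih _ (roundB_len A m hE w hw)

lemma iterB_mono (A : List (List (Int × Int))) (m : Int) (hE : EdgesOk A) :
    ∀ (k : Nat) (w : List Bool), w.length = A.length →
      ∀ j, w.getD j false = true → (iterB A m k w).getD j false = true := by
  intro k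
  induction k with
  | zero => intro w _ j hj; exact hj
  | succ k ih =>
    intro w hw j hj
    exact ih _ (roundB_len A m hE w hw) j (roundB_mono A m hE w hw j hj)

lemma iterB_sound (A : List (List (Int × Int))) (m : Int) (hE : EdgesOk A) (r0 : Nat) :
    ∀ (k : Nat) (w : List Bool), w.length = A.length →
      (∀ j, w.getD j false = true → ReachG A m r0 j) →
      ∀ j, (iterB A m k w).getD j false = true → ReachG A m r0 j := by
  intro k
  induction k with
  | zero => intro w _ hInv; exact hInv
  | succ k ih =>
    intro w hw hInv
    exact ih _ (roundB_len A m hE w hw) (roundB_sound A m hE r0 w hw hInv)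

-- enough rounds reach the fixed point: each non-fixed round strictly decreases the number of
-- unmarked nodes
lemma iterB_reaches_fix (A : List (List (Int × Int))) (m : Int) (hE : EdgesOk A) :
    ∀ (k : Nat) (w : List Bool), w.length = A.length → w.count false < k →
      roundB A m (iterB A m k w) = iterB A m k w := by
  intro k
  induction k with
  | zero => intro w _ hf; omega
  | succ k ih =>
    intro w hw hf
    by_cases hfix : roundB A m w = w
    · rw [iterB, hfix, iterB_fix A m w hfix k, hfix]
    · have hlen : (roundB A m w).length = A.length := roundB_len A m hE w hw
      have hmono := roundB_mono A m hE w hw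
      obtain ⟨_, hstrict⟩ := count_false_mono w (roundB A m w) (hlen.trans hw.symm) hmono
      have hlt : (roundB A m w).count false < w.count false := hstrict hfix
      rw [iterB]
      exact ih (roundB A m w) hlen (by omega)

lemma B_char (A : List (List (Int × Int))) (m : Int) (s : Int) (hE : EdgesOk A)
    (hn : 0 < A.length) (hs : PySem.Raise.InRange A.length s) :
    ∀ j, (iterB A m A.length
        (PySem.List.pySetD (List.replicate A.length false) s true)).getD j false = true ↔
      ReachG A m (ixn A.length s) j := by
  have hrep : ∀ j, (List.replicate A.length false).getD j false = false := by
    intro j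
    by_cases h : j < A.length
    · simp [List.getD_eq_getElem?_getD, List.getElem?_replicate, h]
    · rw [List.getD_eq_default _ _ (by simpa using not_lt.mp h)]
  have hks : ixn A.length s < A.length := ixn_lt _ _ hs
  have hset : PySem.List.pySetD (List.replicate A.length false) s true =
      (List.replicate A.length false).set (ixn A.length s) true := by
    rw [pySetD_eq _ s true (by simpa using hs)]
    congr 1
    simp
  rw [hset]
  set w0 := (List.replicate A.length false).set (ixn A.length s) true with hw0
  have hw0l : w0.length = A.length := by simp [hw0]
  have hw0s : w0.getD (ixn A.length s) false = true :=
    getD_set_true_self _ _ (by simpa using hks)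
  have hw0j : ∀ j, j ≠ ixn A.length s → w0.getD j false = false := by
    intro j hj
    rw [hw0, getD_set_ne _ _ _ _ hj]
    exact hrep j
  have hcf : w0.count false + 1 = (List.replicate A.length false).count false :=
    cF_set_true _ _ (by simpa using hks) (hrep _)
  have hcrep : (List.replicate A.length false).count false = A.length := by
    simp [List.count_replicate]
  have hfix : roundB A m (iterB A m A.length w0) = iterB A m A.length w0 :=
    iterB_reaches_fix A m hE A.length w0 hw0l (by omega)
  have hrl : (iterB A m A.length w0).length = A.length := iterB_len A m hE _ w0 hw0l
  have hInv0 : ∀ j, w0.getD j false = true → ReachG A m (ixn A.length s) j := by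
    intro j hj
    by_cases h : j = ixn A.length s
    · exact h ▸ Relation.ReflTransGen.refl
    · rw [hw0j j h] at hj; exact absurd hj (by simp)
  intro j
  constructor
  · exact iterB_sound A m hE (ixn A.length s) A.length w0 hw0l hInv0 j
  · intro h
    induction h with
    | refl => exact iterB_mono A m hE A.length w0 hw0l _ hw0s
    | tail h1 h2 ihr =>
      obtain ⟨p, hp, hmp, hip⟩ := h2
      rename_i b' b
      have hb' : b' < A.length := by
        by_contra hge
        rw [List.getD_eq_default _ _ (by omega)] at hp
        simp at hp
      have := roundB_marks A m hE (iterB A m A.length w0) hrl b' hb' ihr p hp hmp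
      rw [hfix] at this
      exact hip ▸ this

-- ===== VERDICT (by name: the statement is the Claim_ definition above) =====
theorem dfs_spec : Claim_equal_dfs := by
  intro A s t m _ hpre
  obtain ⟨hn, hs, ht, hE⟩ := hpre
  have hE' : EdgesOk A := hE
  have hkt : ixn A.length t < A.length := ixn_lt _ _ ht
  have hA := A_char A m s hE' hn hs
  have hB := B_char A m s hE' hn hs
  unfold Spec_dfs dfs dfs_alt
  have hlA : (dfsVisitA A m (A.length + 1) s (List.replicate A.length false)).length = A.length := by
    obtain ⟨⟨hl, _⟩, _, _⟩ := A_main A m hE' (A.length + 1) s (List.replicate A.length false)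
      (by simp) hs (by simp [List.count_replicate]) (by
        by_cases h : ixn A.length s < A.length
        · simp [List.getD_eq_getElem?_getD, List.getElem?_replicate, h]
        · rw [List.getD_eq_default _ _ (by simpa using not_lt.mp h)])
    simpa using hl
  have hlB : (iterB A m A.length
      (PySem.List.pySetD (List.replicate A.length false) s true)).length = A.length := by
    apply iterB_len A m hE'
    rw [pySetD_eq _ s true (by simpa using hs)]
    simp
  rw [pyGetD_eq _ t false false (by rwa [hlA]), pyGetD_eq _ t false false (by rwa [hlB])]
  have e1 : ixn (dfsVisitA A m (A.length + 1) s (List.replicate A.length false)).length t =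
      ixn A.length t := by rw [hlA]
  have e2 : ixn (iterB A m A.length
      (PySem.List.pySetD (List.replicate A.length false) s true)).length t = ixn A.length t := by
    rw [hlB]
  rw [e1, e2]
  have h1 := hA (ixn A.length t)
  have h2 := hB (ixn A.length t)
  rcases Bool.eq_false_or_eq_true ((dfsVisitA A m (A.length + 1) s
      (List.replicate A.length false)).getD (ixn A.length t) false) with hx | hx <;>
    rcases Bool.eq_false_or_eq_true ((iterB A m A.length
      (PySem.List.pySetD (List.replicate A.length false) s true)).getD (ixn A.length t) false) with hy | hy <;>
    simp_all
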